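-- pv_equiv track=rewrite | github.com/Mrigaank-9/ninja | 05.py | min_tickets
-- ===== SOURCE A (Python) =====
-- def min_tickets(A):
--     M = max(A)
--     dp = [float('inf')] * (M+3)
--     dp[0] = 0
--     for j in range(1, M+3):
--         for k in range(1, 4):
--             if j-k >= 0:
--                 dp[j] = min(dp[j], dp[j-k]+1)
--     min_tickets = 0
--     for a in A:
--         min_tickets += dp[a]
--     return min_tickets
-- ===== SOURCE B (Python) =====
-- def min_tickets(A):
--     return sum((a + 2) // 3 for a in A)
-- ===== Notes on version B (the rewrite author's own statement) =====
-- stated objective: simpler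
-- what changed: Replaces the O(max(A)) dynamic-programming table of minimal 1/2/3-step counts by the closed form ceil(a/3) = (a+2)//3 summed in one pass; Pre_ restricts to the function's natural domain (nonempty lists of nonnegative targets): negative targets are unreachable with steps of +1/+2/+3, and on them A either raises IndexError or returns a dp entry reached through Python's negative indexing, not a step count.
-- outside the precondition, e.g. on min_tickets([]): A raises ValueError, B returns 0; on min_tickets([1, -1]): A returns 2, B returns 1; on min_tickets([-5]): A raises IndexError, B returns -1
import Mathlib
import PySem

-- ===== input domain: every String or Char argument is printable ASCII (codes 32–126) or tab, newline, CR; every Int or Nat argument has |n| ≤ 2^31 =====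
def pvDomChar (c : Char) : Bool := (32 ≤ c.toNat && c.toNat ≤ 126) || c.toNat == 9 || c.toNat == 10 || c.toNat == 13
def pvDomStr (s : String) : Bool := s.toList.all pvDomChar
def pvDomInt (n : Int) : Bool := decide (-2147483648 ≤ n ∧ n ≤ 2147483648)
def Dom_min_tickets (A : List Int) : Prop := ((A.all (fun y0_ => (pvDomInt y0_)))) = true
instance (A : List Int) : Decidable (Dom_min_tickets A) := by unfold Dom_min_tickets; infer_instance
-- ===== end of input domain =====

-- B replaces A's dynamic-programming table over range(max(A)+3) by the closed form
-- ceil(a/3) = (a+2)//3 summed in one pass: simpler, no table.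

-- ===== PORT A =====
-- Python's float('inf') table entries are modelled as `none` (inf never reaches the
-- returned sum on inputs in Pre_); min(inf, x) = x, inf + 1 = inf — exact on that domain.
def pvOMin (a b : Option Int) : Option Int :=
  match a, b with
  | none, b => b
  | some x, none => some x
  | some x, some y => some (min x y)

-- inner loop: for k in range(1, 4): if j-k >= 0: dp[j] = min(dp[j], dp[j-k]+1)
def pvStep (j : Int) (dp : List (Option Int)) (k : Int) : List (Option Int) :=
  if j - k ≥ 0 then
    PySem.List.pySetD dp j
      (pvOMin (PySem.List.pyGetD dp j none)
              ((PySem.List.pyGetD dp (j - k) none).map (· + 1)))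
  else dp

def pvInner (dp : List (Option Int)) (j : Int) : List (Option Int) :=
  (PySem.List.pyRange 1 4 1).foldl (pvStep j) dp

def min_tickets (A : List Int) : Int :=
  match PySem.List.max? A (fun x => x) with
  | none => 0  -- Python: ValueError on empty A; excluded by Pre_
  | some M =>
    -- dp = [inf]*(M+3); dp[0] = 0
    let dp0 : List (Option Int) :=
      PySem.List.pySetD (List.replicate (M + 3).toNat none) 0 (some 0)
    let dp := (PySem.List.pyRange 1 (M + 3) 1).foldl pvInner dp0
    -- for a in A: min_tickets += dp[a]   (dp[a] is a finite int on Pre_; the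
    -- IndexError / float-inf cases lie outside Pre_)
    A.foldl (fun s a => s + ((PySem.List.pyGetD dp a none).getD 0)) 0

-- ===== PORT B =====
def min_tickets_alt (A : List Int) : Int :=
  A.foldl (fun s a => s + PySem.Int.floordiv (a + 2) 3) 0

-- ===== PRECONDITION & SPEC =====
-- The function's natural domain: nonempty lists of nonnegative targets (a negative target is
-- unreachable with steps of +1/+2/+3). Excluded: the empty list (A raises ValueError on
-- max([])), elements below -(max(A)+3) (A raises IndexError), and negative in-range
-- elements, where A returns a dp entry reached through Python's negative indexing, not a
-- step count.
def Pre_min_tickets (A : List Int) : Prop :=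
  A ≠ [] ∧ ∀ a ∈ A, 0 ≤ a
instance (A : List Int) : Decidable (Pre_min_tickets A) := by unfold Pre_min_tickets; infer_instance

def pvWitness_min_tickets : List Int := [1, 5, 3]

def Spec_min_tickets (A : List Int) (out : Int) : Prop := out = min_tickets_alt A
instance (A : List Int) (out : Int) : Decidable (Spec_min_tickets A out) := by unfold Spec_min_tickets; infer_instance

-- ===== CLAIM =====
def Claim_equal_min_tickets : Prop := ∀ (A : List Int), Dom_min_tickets A → Pre_min_tickets A → Spec_min_tickets A (min_tickets A)

-- ===== LEMMAS AND PROOFS =====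

-- the closed form: c i = ceil(i/3) for a nonnegative index i
def pvC (i : Nat) : Int := ((i + 2) / 3 : Nat)

-- the dp table after the outer loop has processed j = 1 .. t
def pvE (n t : Nat) : List (Option Int) :=
  (List.range n).map (fun i => if i ≤ t then some (pvC i) else none)

theorem length_pvE (n t : Nat) : (pvE n t).length = n := by
  simp [pvE]

theorem getElem_pvE (n t i : Nat) (h : i < n) :
    (pvE n t)[i]'(by simpa [length_pvE] using h) = if i ≤ t then some (pvC i) else none := by
  simp [pvE]

theorem getD_pvE (n t i : Nat) (h : i < n) :
    (pvE n t).getD i none = if i ≤ t then some (pvC i) else none := by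
  rw [List.getD_eq_getElem _ _ (by simpa [length_pvE] using h)]
  exact getElem_pvE n t i h

theorem pvE_set (n t : Nat) (h : t + 1 < n) :
    (pvE n t).set (t + 1) (some (pvC (t + 1))) = pvE n (t + 1) := by
  apply List.ext_getElem
  · simp [pvE]
  · intro i h1 h2
    rw [List.getElem_set]
    simp only [length_pvE, List.length_set] at h1 h2
    rw [getElem_pvE n (t+1) i h2, getElem_pvE n t i h2]
    split_ifs <;> first | rfl | omega | (subst_vars; rfl)

theorem pvDp0_eq (n : Nat) (hn : 1 ≤ n) :
    PySem.List.pySetD (List.replicate n (none : Option Int)) 0 (some 0) = pvE n 0 := by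
  rw [show (0 : Int) = ((0 : Nat) : Int) from rfl, PySem.List.pySetD_natCast]
  apply List.ext_getElem
  · simp [pvE]
  · intro i h1 h2
    simp only [List.length_set, List.length_replicate] at h1
    rw [List.getElem_set]
    rw [getElem_pvE n 0 i (by simpa [length_pvE] using h2)]
    rcases Nat.eq_zero_or_pos i with h | h
    · subst h; simp [pvC]
    · rw [if_neg (by omega), List.getElem_replicate, if_neg (by omega)]

theorem getD_set_pvE (n t : Nat) (v : Option Int) (s : Nat) (hs : s < n) (h : t + 1 < n) :
    ((pvE n t).set (t + 1) v).getD s none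
      = if s = t + 1 then v else (if s ≤ t then some (pvC s) else none) := by
  by_cases hst : s = t + 1
  · subst hst
    rw [List.getD_eq_getElem _ _ (by simp [length_pvE]; omega),
        List.getElem_set_self (by simp [length_pvE]; omega)]
    simp
  · rw [List.getD_eq_getElem _ _ (by simp [length_pvE]; omega), List.getElem_set_ne (by omega),
        ← List.getD_eq_getElem _ _ (by simp [length_pvE]; omega), getD_pvE n t s hs]
    simp [hst]

theorem pvStep_one (n t : Nat) (h : t + 1 < n) :
    pvStep ((t : Int) + 1) (pvE n t) 1 = (pvE n t).set (t + 1) (some (pvC t + 1)) := by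
  unfold pvStep
  rw [if_pos (by omega : (t : Int) + 1 - 1 ≥ 0)]
  rw [show (t : Int) + 1 - 1 = ((t : Nat) : Int) from by omega]
  rw [show (t : Int) + 1 = ((t + 1 : Nat) : Int) from by omega]
  rw [PySem.List.pySetD_natCast, PySem.List.pyGetD_natCast, PySem.List.pyGetD_natCast]
  rw [getD_pvE n t (t + 1) h, getD_pvE n t t (by omega)]
  rw [if_neg (by omega), if_pos (le_refl t)]
  simp [pvOMin]

theorem pvStep_two_neg (n t : Nat) (ht : t = 0) (v : Option Int) :
    pvStep ((t : Int) + 1) ((pvE n t).set (t + 1) v) 2 = (pvE n t).set (t + 1) v := by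
  unfold pvStep
  rw [if_neg (by omega : ¬ (t : Int) + 1 - 2 ≥ 0)]

theorem pvStep_two (n t : Nat) (ht : 1 ≤ t) (h : t + 1 < n) :
    pvStep ((t : Int) + 1) ((pvE n t).set (t + 1) (some (pvC t + 1))) 2
      = (pvE n t).set (t + 1) (some (min (pvC t + 1) (pvC (t - 1) + 1))) := by
  unfold pvStep
  rw [if_pos (by omega : (t : Int) + 1 - 2 ≥ 0)]
  rw [show (t : Int) + 1 - 2 = ((t - 1 : Nat) : Int) from by omega]
  rw [show (t : Int) + 1 = ((t + 1 : Nat) : Int) from by omega]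
  rw [PySem.List.pySetD_natCast, PySem.List.pyGetD_natCast, PySem.List.pyGetD_natCast]
  rw [getD_set_pvE n t _ (t + 1) (by omega) h, getD_set_pvE n t _ (t - 1) (by omega) h]
  rw [if_pos rfl, if_neg (by omega : ¬ t - 1 = t + 1), if_pos (by omega : t - 1 ≤ t)]
  simp [pvOMin, List.set_set]

theorem pvStep_three_neg (n t : Nat) (ht : t < 2) (v : Option Int) :
    pvStep ((t : Int) + 1) ((pvE n t).set (t + 1) v) 3 = (pvE n t).set (t + 1) v := by
  unfold pvStep
  rw [if_neg (by omega : ¬ (t : Int) + 1 - 3 ≥ 0)]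

theorem pvStep_three (n t : Nat) (ht : 2 ≤ t) (h : t + 1 < n) (v : Int) :
    pvStep ((t : Int) + 1) ((pvE n t).set (t + 1) (some v)) 3
      = (pvE n t).set (t + 1) (some (min v (pvC (t - 2) + 1))) := by
  unfold pvStep
  rw [if_pos (by omega : (t : Int) + 1 - 3 ≥ 0)]
  rw [show (t : Int) + 1 - 3 = ((t - 2 : Nat) : Int) from by omega]
  rw [show (t : Int) + 1 = ((t + 1 : Nat) : Int) from by omega]
  rw [PySem.List.pySetD_natCast, PySem.List.pyGetD_natCast, PySem.List.pyGetD_natCast]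
  rw [getD_set_pvE n t _ (t + 1) (by omega) h, getD_set_pvE n t _ (t - 2) (by omega) h]
  rw [if_pos rfl, if_neg (by omega : ¬ t - 2 = t + 1), if_pos (by omega : t - 2 ≤ t)]
  simp [pvOMin, List.set_set]

theorem pvInner_step (n t : Nat) (h : t + 1 < n) :
    pvInner (pvE n t) ((t : Int) + 1) = pvE n (t + 1) := by
  have hr : PySem.List.pyRange 1 4 1 = [1, 2, 3] := by decide
  unfold pvInner
  rw [hr]
  simp only [List.foldl_cons, List.foldl_nil]
  rw [pvStep_one n t h]
  rcases Nat.lt_or_ge t 1 with ht | ht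
  · -- t = 0 : k = 2 and k = 3 do nothing
    rw [pvStep_two_neg n t (by omega), pvStep_three_neg n t (by omega)]
    rw [← pvE_set n t h]
    congr 2
    unfold pvC; omega
  rcases Nat.lt_or_ge t 2 with ht2 | ht2
  · -- t = 1 : k = 3 does nothing
    rw [pvStep_two n t ht h, pvStep_three_neg n t (by omega)]
    rw [← pvE_set n t h]
    congr 2
    unfold pvC; omega
  · -- t ≥ 2 : all three k fire
    rw [pvStep_two n t ht h, pvStep_three n t ht2 h _]
    rw [← pvE_set n t h]
    congr 2
    unfold pvC; omega

theorem pvFold_good (n : Nat) (hn : 1 ≤ n) :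
    ∀ m : Nat, m + 1 ≤ n →
      (PySem.List.pyRange 1 ((m : Int) + 1) 1).foldl pvInner
        (PySem.List.pySetD (List.replicate n (none : Option Int)) 0 (some 0)) = pvE n m := by
  intro m
  induction m with
  | zero =>
    intro _
    rw [PySem.List.pyRange_one_eq_nil (by omega)]
    simpa using pvDp0_eq n (by omega)
  | succ m ih =>
    intro hm
    rw [PySem.List.pyRange_one_succ_right (by omega : (1 : Int) ≤ ((m + 1 : Nat) : Int)),
        List.foldl_append]
    rw [show ((m + 1 : Nat) : Int) = (m : Int) + 1 from by omega]
    rw [ih (by omega)]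
    simp only [List.foldl_cons, List.foldl_nil]
    exact pvInner_step n m (by omega)

-- ===== VERDICT =====
theorem min_tickets_spec : Claim_equal_min_tickets := by
  intro A _ hpre
  obtain ⟨hne, hnn⟩ := hpre
  unfold Spec_min_tickets
  obtain ⟨x, t, rfl⟩ : ∃ x t, A = x :: t := by
    cases A with
    | nil => exact absurd rfl hne
    | cons x t => exact ⟨x, t, rfl⟩
  unfold min_tickets min_tickets_alt
  have hmax : PySem.List.max? (x :: t) (fun y => y) = some (t.foldl max x) :=
    PySem.List.max?_id_cons x t
  set M : Int := t.foldl max x with hM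
  rw [hmax]
  dsimp only
  have hMle : ∀ a ∈ x :: t, a ≤ M := fun a ha => PySem.List.max?_isMax hmax a ha
  have hnneg : ∀ a ∈ x :: t, 0 ≤ a := hnn
  have hM0 : 0 ≤ M := hnneg M (PySem.List.max?_mem hmax)
  set n : Nat := (M + 3).toNat with hn
  have hnM : (n : Int) = M + 3 := by omega
  have hrange : PySem.List.pyRange 1 (M + 3) 1 = PySem.List.pyRange 1 (((n - 1 : Nat) : Int) + 1) 1 := by
    congr 1; omega
  rw [hrange, pvFold_good n (by omega) (n - 1) (by omega)]
  apply PySem.List.foldl_congr_mem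
  intro s a ha
  have haM := hMle a ha
  have ha0 := hnneg a ha
  rw [show a = ((a.toNat : Nat) : Int) from by omega]
  rw [PySem.List.pyGetD_natCast, getD_pvE n (n - 1) a.toNat (by omega)]
  rw [if_pos (by omega : a.toNat ≤ n - 1)]
  simp only [Option.getD_some, pvC]
  rw [PySem.Int.floordiv_eq_ediv_of_pos (by omega)]
  omega
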